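-- pv_equiv track=rewrite | github.com/hhteemu/advent_of_code_23 | day1.py | keep_numbers
-- ===== SOURCE A (Python) =====
-- def keep_numbers(input_string):
--     result = ''
--     i = 0
--     while i < len(input_string):
--         if input_string[i].isdigit():
--             result += input_string[i]
--             i += 1
--         else:
--             if input_string[i:i+3] == 'one':
--                 result += '1'
--                 i += 1
--             elif input_string[i:i+3] == 'two':
--                 result += '2'
--                 i += 1
--             elif input_string[i:i+5] == 'three':
--                 result += '3'
--                 i += 1
--             elif input_string[i:i+4] == 'four':
--                 result += '4'
--                 i += 1
--             elif input_string[i:i+4] == 'five':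
--                 result += '5'
--                 i += 1
--             elif input_string[i:i+3] == 'six':
--                 result += '6'
--                 i += 1
--             elif input_string[i:i+5] == 'seven':
--                 result += '7'
--                 i += 1
--             elif input_string[i:i+5] == 'eight':
--                 result += '8'
--                 i += 1
--             elif input_string[i:i+4] == 'nine':
--                 result += '9'
--                 i += 1
--             else:
--                 i += 1
--
--     return result
-- ===== SOURCE B (Python) =====
-- WORDS = {'one': '1', 'two': '2', 'three': '3', 'four': '4', 'five': '5',
--          'six': '6', 'seven': '7', 'eight': '8', 'nine': '9'}
--
--
-- def keep_numbers(input_string):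
--     # Staged passes: collect every (position, digit-char) event, one pass per
--     # spelled word plus one pass for literal digit characters, then sort by
--     # position and join.  Positions are unique (no word is a prefix of another
--     # and no word starts with a digit character), so the order is well defined.
--     events = []
--     for word, digit in WORDS.items():
--         events += [(i, digit) for i in range(len(input_string))
--                    if input_string.startswith(word, i)]
--     events += [(i, c) for i, c in enumerate(input_string) if c.isdigit()]
--     events.sort(key=lambda e: e[0])
--     return ''.join(c for _, c in events)
-- ===== Notes on version B (the rewrite author's own statement) =====
-- stated objective: alternative
-- what changed: Instead of A's single left-to-right scan with a per-position if/elif chain, B makes one pass per spelled word plus one pass for digit characters collecting (position, digit) events, then sorts the events by position and joins; correctness rests on no word being a prefix of another and no word starting with a digit, so positions are unique.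
import Mathlib
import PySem

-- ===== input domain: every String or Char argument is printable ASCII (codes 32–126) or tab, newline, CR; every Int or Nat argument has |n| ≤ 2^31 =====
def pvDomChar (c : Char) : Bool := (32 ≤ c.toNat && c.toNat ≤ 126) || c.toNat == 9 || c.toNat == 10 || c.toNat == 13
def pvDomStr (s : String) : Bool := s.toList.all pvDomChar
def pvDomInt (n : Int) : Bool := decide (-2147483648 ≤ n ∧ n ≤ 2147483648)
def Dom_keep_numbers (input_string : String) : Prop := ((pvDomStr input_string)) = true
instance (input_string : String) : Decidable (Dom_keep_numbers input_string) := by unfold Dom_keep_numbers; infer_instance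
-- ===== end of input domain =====

-- B replaces A's single left-to-right scan (if/elif chain per position) by staged passes:
-- it collects (position, digit) events — one pass per spelled word plus one pass for digit
-- characters — then sorts the events by position and joins (objective: alternative).

-- ===== PORT A =====
-- A always advances i by exactly 1, so the while loop over index i is the structural
-- recursion over the current suffix; input_string[i:i+k] is the suffix's take k.
def keepNumbersLoopA : List Char → List Char
  | [] => []
  | c :: rest =>
    if PySem.Chars.isdigit c then c :: keepNumbersLoopA rest
    else if (c :: rest).take 3 = "one".toList then '1' :: keepNumbersLoopA rest
    else if (c :: rest).take 3 = "two".toList then '2' :: keepNumbersLoopA rest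
    else if (c :: rest).take 5 = "three".toList then '3' :: keepNumbersLoopA rest
    else if (c :: rest).take 4 = "four".toList then '4' :: keepNumbersLoopA rest
    else if (c :: rest).take 4 = "five".toList then '5' :: keepNumbersLoopA rest
    else if (c :: rest).take 3 = "six".toList then '6' :: keepNumbersLoopA rest
    else if (c :: rest).take 5 = "seven".toList then '7' :: keepNumbersLoopA rest
    else if (c :: rest).take 5 = "eight".toList then '8' :: keepNumbersLoopA rest
    else if (c :: rest).take 4 = "nine".toList then '9' :: keepNumbersLoopA rest
    else keepNumbersLoopA rest

def keep_numbers (input_string : String) : String :=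
  String.mk (keepNumbersLoopA input_string.toList)

-- ===== PORT B =====
-- WORDS.items() in insertion order
def pvWords : List (List Char × Char) :=
  [("one".toList, '1'), ("two".toList, '2'), ("three".toList, '3'),
   ("four".toList, '4'), ("five".toList, '5'), ("six".toList, '6'),
   ("seven".toList, '7'), ("eight".toList, '8'), ("nine".toList, '9')]

-- Source B: one comprehension per word, one comprehension for digit chars, sort by position, join.
-- input_string.startswith(word, i) is exact as startswith on the dropped suffix since 0 ≤ i;
-- range(len(s)) is List.range with the index cast to Int in the event (all indices nonnegative).
def keep_numbers_alt (input_string : String) : String :=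
  let s := input_string.toList
  let wordEvents := pvWords.foldl (fun acc p =>
    acc ++ ((List.range s.length).filter
        (fun i => PySem.Chars.startswith (s.drop i) p.1)).map
      (fun i : Nat => ((i : Int), p.2))) ([] : List (Int × Char))
  let events := wordEvents ++
    (PySem.List.enumerate s 0).filter (fun q => PySem.Chars.isdigit q.2)
  String.mk ((PySem.List.sorted events (fun q => q.1)).map (·.2))

-- ===== PRECONDITION & SPEC =====
def Spec_keep_numbers (input_string : String) (out : String) : Prop := out = keep_numbers_alt input_string
instance (input_string : String) (out : String) : Decidable (Spec_keep_numbers input_string out) := by unfold Spec_keep_numbers; infer_instance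

-- ===== CLAIM (what is proved, stated in full; the proofs are below) =====
def Claim_equal_keep_numbers : Prop := ∀ (input_string : String), Dom_keep_numbers input_string → Spec_keep_numbers input_string (keep_numbers input_string)

-- ===== LEMMAS AND PROOFS =====

-- what A emits at one position, as a function of the current suffix
def emitB : List Char → Option Char
  | [] => none
  | c :: rest =>
    if PySem.Chars.isdigit c then some c
    else (pvWords.find? (fun p => PySem.Chars.startswith (c :: rest) p.1)).map (·.2)

-- A's output annotated with positions
def annot (s : List Char) : List (Int × Char) :=
  (List.range s.length).filterMap
    (fun i => (emitB (s.drop i)).map (fun c => ((i : Int), c)))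

-- B's event list before sorting
def eventsOf (s : List Char) : List (Int × Char) :=
  pvWords.flatMap (fun p =>
    ((List.range s.length).filter
        (fun i => PySem.Chars.startswith (s.drop i) p.1)).map
      (fun i : Nat => ((i : Int), p.2)))
  ++ (PySem.List.enumerate s 0).filter (fun q => PySem.Chars.isdigit q.2)

theorem take_eq_startswith {l w : List Char} {n : Nat} (hn : w.length = n) :
    (l.take n = w) ↔ (PySem.Chars.startswith l w = true) := by
  subst hn
  rw [PySem.Chars.startswith_iff, List.prefix_iff_eq_take]
  exact ⟨fun h => h.symm, fun h => h.symm⟩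

theorem loopA_cons (c : Char) (rest : List Char) :
    keepNumbersLoopA (c :: rest) = (emitB (c :: rest)).toList ++ keepNumbersLoopA rest := by
  rw [keepNumbersLoopA, emitB]
  simp only [take_eq_startswith (by decide : ("one".toList).length = 3),
    take_eq_startswith (by decide : ("two".toList).length = 3),
    take_eq_startswith (by decide : ("three".toList).length = 5),
    take_eq_startswith (by decide : ("four".toList).length = 4),
    take_eq_startswith (by decide : ("five".toList).length = 4),
    take_eq_startswith (by decide : ("six".toList).length = 3),
    take_eq_startswith (by decide : ("seven".toList).length = 5),
    take_eq_startswith (by decide : ("eight".toList).length = 5),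
    take_eq_startswith (by decide : ("nine".toList).length = 4),
    pvWords, List.find?_cons]
  split_ifs <;> simp_all

theorem loopA_eq_annot (s : List Char) :
    keepNumbersLoopA s = (annot s).map (·.2) := by
  rw [annot, List.map_filterMap]
  simp only [Option.map_map]
  have : ∀ l : List Char, keepNumbersLoopA l =
      (List.range l.length).filterMap (fun i => emitB (l.drop i)) := by
    intro l
    induction l with
    | nil => rfl
    | cons c rest ih =>
      rw [loopA_cons, List.length_cons, List.range_succ_eq_map, List.filterMap_cons,
        List.filterMap_map]
      simp only [List.drop_zero, Function.comp_def, Nat.succ_eq_add_one, List.drop_succ_cons]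
      cases emitB (c :: rest) with
      | none => simp [ih]
      | some v => simp [ih]
  rw [this]
  congr 1
  funext i
  cases emitB (s.drop i) <;> rfl

-- each table word is nonempty, starts with a non-digit character, and digits determine entries
theorem pvWords_shape : ∀ p ∈ pvWords, p.1 ≠ [] ∧ PySem.Chars.isdigit p.1.headI = false := by
  decide

theorem pvWords_no_prefix : ∀ p ∈ pvWords, ∀ q ∈ pvWords, p.1 <+: q.1 → p = q := by
  decide

theorem pvWords_snd_inj : pvWords.Pairwise (fun p q => p.2 ≠ q.2) := by decide

-- at most one word matches a given suffix
theorem uniq_match {t : List Char} {p q : List Char × Char} (hp : p ∈ pvWords)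
    (hq : q ∈ pvWords) (hsp : PySem.Chars.startswith t p.1 = true)
    (hsq : PySem.Chars.startswith t q.1 = true) : p = q := by
  rw [PySem.Chars.startswith_iff] at hsp hsq
  rcases List.prefix_or_prefix_of_prefix hsp hsq with h | h
  · exact pvWords_no_prefix p hp q hq h
  · exact (pvWords_no_prefix q hq p hp h).symm

-- a word match at i forces a non-digit character at i
theorem not_digit_of_match {s : List Char} {i : Nat} {w : List Char × Char}
    (hw : w ∈ pvWords) (hi : i < s.length)
    (hm : PySem.Chars.startswith (s.drop i) w.1 = true) :
    PySem.Chars.isdigit s[i] = false := by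
  obtain ⟨hne, hhd⟩ := pvWords_shape w hw
  rw [List.drop_eq_getElem_cons hi, PySem.Chars.startswith_iff] at hm
  cases hw1 : w.1 with
  | nil => exact absurd hw1 hne
  | cons c0 w' =>
    rw [hw1, List.cons_prefix_cons] at hm
    rw [hw1] at hhd
    simpa [← hm.1] using hhd

theorem mem_annot_iff {s : List Char} {x : Int × Char} :
    x ∈ annot s ↔ x ∈ eventsOf s := by
  constructor
  · rintro hx
    simp only [annot, List.mem_filterMap, List.mem_range, Option.map_eq_some_iff] at hx
    obtain ⟨i, hi, c, hc, hxc⟩ := hx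
    rw [List.drop_eq_getElem_cons hi, emitB] at hc
    by_cases hdig : PySem.Chars.isdigit s[i] = true
    · rw [if_pos hdig] at hc
      apply List.mem_append_right
      simp only [List.mem_filter, PySem.List.mem_enumerate_iff]
      refine ⟨⟨i, hi, ?_⟩, ?_⟩
      · rw [← hxc]; simp [Option.some_inj.mp hc]
      · rw [← hxc]; simpa [Option.some_inj.mp hc] using hdig
    · rw [if_neg hdig] at hc
      simp only [Option.map_eq_some_iff] at hc
      obtain ⟨p, hp, hpc⟩ := hc
      have hpmem := List.mem_of_find?_eq_some hp
      have hppred := List.find?_some hp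
      apply List.mem_append_left
      simp only [List.mem_flatMap, List.mem_map, List.mem_filter, List.mem_range]
      exact ⟨p, hpmem, i,
        ⟨hi, by rw [List.drop_eq_getElem_cons hi]; exact hppred⟩, by rw [← hxc, hpc]⟩
  · intro hx
    rcases List.mem_append.mp hx with hx | hx
    · simp only [List.mem_flatMap, List.mem_map, List.mem_filter, List.mem_range] at hx
      obtain ⟨p, hp, i, ⟨hi, hm⟩, hxi⟩ := hx
      simp only [annot, List.mem_filterMap, List.mem_range]
      refine ⟨i, hi, ?_⟩
      have hdig := not_digit_of_match hp hi hm
      rw [List.drop_eq_getElem_cons hi] at hm ⊢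
      rw [emitB, if_neg (by simp [hdig])]
      have hfind : ∃ q, pvWords.find?
          (fun p => PySem.Chars.startswith (s[i] :: s.drop (i + 1)) p.1) = some q := by
        rcases h : pvWords.find?
            (fun p => PySem.Chars.startswith (s[i] :: s.drop (i + 1)) p.1) with _ | q
        · exact absurd hm (by simpa using List.find?_eq_none.mp h p hp)
        · exact ⟨q, h⟩
      obtain ⟨q, hq⟩ := hfind
      have hqpred : PySem.Chars.startswith (s[i] :: s.drop (i + 1)) q.1 = true := by
        have := List.find?_some hq
        simpa using this
      have hqp : q = p := uniq_match (List.mem_of_find?_eq_some hq) hp hqpred hm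
      rw [hq, hqp, ← hxi]
      rfl
    · simp only [List.mem_filter, PySem.List.mem_enumerate_iff] at hx
      obtain ⟨⟨k, hk, hxk⟩, hdig⟩ := hx
      simp only [annot, List.mem_filterMap, List.mem_range]
      refine ⟨k, hk, ?_⟩
      rw [List.drop_eq_getElem_cons hk, emitB,
        if_pos (by rw [hxk] at hdig; simpa using hdig)]
      rw [hxk]
      simp

theorem annot_pairwise (s : List Char) :
    (annot s).Pairwise (fun a b => a.1 < b.1) := by
  rw [annot, List.pairwise_filterMap]
  refine List.pairwise_lt_range.imp ?_
  intro i j hij b hb b' hb'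
  simp only [Option.map_eq_some_iff] at hb hb'
  obtain ⟨c, _, hbc⟩ := hb
  obtain ⟨c', _, hbc'⟩ := hb'
  rw [← hbc, ← hbc']
  simpa using hij

theorem annot_nodup (s : List Char) : (annot s).Nodup :=
  (annot_pairwise s).imp (fun h he => by rw [he] at h; exact lt_irrefl _ h)

theorem eventsOf_nodup (s : List Char) : (eventsOf s).Nodup := by
  rw [eventsOf]
  apply List.Nodup.append
  · rw [List.nodup_flatMap]
    constructor
    · intro p _
      exact ((List.nodup_range).filter _).map
        (fun a b hab => by simpa using congrArg Prod.fst hab)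
    · refine pvWords_snd_inj.imp ?_
      intro p q hpq x hxp hxq
      simp only [List.mem_map, List.mem_filter, List.mem_range] at hxp hxq
      obtain ⟨i, _, hxi⟩ := hxp
      obtain ⟨j, _, hxj⟩ := hxq
      exact hpq (congrArg (Prod.snd : Int × Char → Char) (hxi.trans hxj.symm))
  · exact ((PySem.List.pairwise_lt_enumerate s 0).filter _).imp
      (fun h he => by rw [he] at h; exact lt_irrefl _ h)
  · intro x hxw hxd
    simp only [List.mem_flatMap, List.mem_map, List.mem_filter, List.mem_range] at hxw
    simp only [List.mem_filter, PySem.List.mem_enumerate_iff] at hxd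
    obtain ⟨p, hp, i, ⟨hi, hm⟩, hxi⟩ := hxw
    obtain ⟨⟨k, hk, hxk⟩, hdig⟩ := hxd
    have hik : i = k := by
      have h2 := hxi.trans hxk
      have := congrArg Prod.fst h2
      simpa using this
    rw [hxk] at hdig
    rw [hik] at hm
    have := not_digit_of_match hp hk hm
    simp at hdig
    rw [this] at hdig
    exact Bool.false_ne_true hdig

theorem sorted_events_eq (s : List Char) :
    PySem.List.sorted (eventsOf s) (fun q => q.1) = annot s := by
  apply PySem.List.sorted_eq_of_perm_of_pairwise_lt
  · exact (List.perm_ext_iff_of_nodup (annot_nodup s) (eventsOf_nodup s)).mpr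
      (fun x => mem_annot_iff)
  · exact annot_pairwise s

theorem alt_eq (input_string : String) :
    keep_numbers_alt input_string =
      String.mk ((PySem.List.sorted (eventsOf input_string.toList) (fun q => q.1)).map (·.2)) := by
  rw [keep_numbers_alt, eventsOf]
  rw [PySem.List.foldl_append_eq_flatMap]
  simp

-- ===== VERDICT (by name: the statement is the Claim_ definition above) =====
theorem keep_numbers_spec : Claim_equal_keep_numbers := by
  intro s _
  unfold Spec_keep_numbers
  rw [alt_eq, sorted_events_eq, keep_numbers, loopA_eq_annot]
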